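-- pv_equiv track=rewrite | github.com/varkirsova/alg_2sem_lab2 | task2_4.py | coding_varible_length_dc
-- ===== SOURCE A (Python) =====
-- def coding_varible_length_dc(dc_diff):
--     res = []
--     for i in dc_diff:
--         if i == 0:
--             res.append((0, ""))
--             continue
--
--         abs_val = abs(i)
--         size = abs_val.bit_length()
--         if i > 0:
--             amplitude = format(i, f'0{size}b')
--         else:
--             a = format(abs_val, f'0{size}b')
--             amplitude = ''.join('1' if b == '0' else '0' for b in a)
--
--         res.append((size, amplitude))
--     return res
-- ===== SOURCE B (Python) =====
-- def coding_varible_length_dc(dc_diff):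
--     def encode(i):
--         if i == 0:
--             return (0, "")
--         size = abs(i).bit_length()
--         val = i if i > 0 else (1 << size) - 1 + i
--         return (size, format(val, f'0{size}b'))
--     return [encode(i) for i in dc_diff]
-- ===== Notes on version B (the rewrite author's own statement) =====
-- stated objective: simpler
-- what changed: B computes the one's-complement amplitude arithmetically (val = i if i>0 else (1<<size)-1+i) and formats it once, replacing A's per-character string-inversion comprehension and branch-dependent formatting; B is a comprehension over a single closed-form encoder instead of A's loop with two string-building branches.
import Mathlib
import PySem

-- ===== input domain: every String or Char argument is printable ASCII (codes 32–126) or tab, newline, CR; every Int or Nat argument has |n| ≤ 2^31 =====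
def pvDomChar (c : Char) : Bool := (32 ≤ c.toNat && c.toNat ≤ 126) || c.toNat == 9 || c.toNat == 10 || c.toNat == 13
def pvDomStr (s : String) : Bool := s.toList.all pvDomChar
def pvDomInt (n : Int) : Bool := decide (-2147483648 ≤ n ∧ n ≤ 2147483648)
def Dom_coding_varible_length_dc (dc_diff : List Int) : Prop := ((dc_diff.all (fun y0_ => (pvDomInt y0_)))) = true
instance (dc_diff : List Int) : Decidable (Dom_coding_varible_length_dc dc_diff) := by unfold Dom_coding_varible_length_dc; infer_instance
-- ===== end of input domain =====

-- B computes the one's-complement amplitude arithmetically (2^size - 1 + i) and formats once,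
-- instead of A's per-character string inversion; objective: simpler.


-- shared helpers for Python built-ins both sources call:
-- int.bit_length()
def pvBitlen (n : Nat) : Nat :=
  if _h : n = 0 then 0 else pvBitlen (n / 2) + 1
termination_by n
decreasing_by exact Nat.div_lt_self (Nat.pos_of_ne_zero _h) (by omega)

def pvDigit (n : Nat) : Char := if n = 0 then '0' else '1'

-- format(n, 'b') for a nonnegative n (binary digits, msb first)
def pvBits (n : Nat) : List Char :=
  if _h : n < 2 then [pvDigit n] else pvBits (n / 2) ++ [pvDigit (n % 2)]
termination_by n
decreasing_by exact Nat.div_lt_self (by omega) (by omega)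

-- the zero padding of format(·, f'0{k}b')
def pvPad (k : Nat) (l : List Char) : List Char := List.replicate (k - l.length) '0' ++ l

-- ===== PORT A =====
def pvInvChar (b : Char) : Char := if b = '0' then '1' else '0'

def coding_varible_length_dc (dc_diff : List Int) : List (Int × String) :=
  dc_diff.foldl (fun res i =>
    if i = 0 then res ++ [((0 : Int), "")]
    else
      let abs_val := i.natAbs
      let size := pvBitlen abs_val
      if i > 0 then
        -- format(i, f'0{size}b') with i > 0, so the digits of i = abs_val
        res ++ [((size : Int), String.ofList (pvPad size (pvBits abs_val)))]
      else
        res ++ [((size : Int), String.ofList ((pvPad size (pvBits abs_val)).map pvInvChar))]) []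

-- ===== PORT B =====
def cvldEncode (i : Int) : Int × String :=
  if i = 0 then ((0 : Int), "")
  else
    let size := pvBitlen i.natAbs
    let val : Int := if i > 0 then i else 2 ^ size - 1 + i
    ((size : Int), String.ofList (pvPad size (pvBits val.natAbs)))

def coding_varible_length_dc_alt (dc_diff : List Int) : List (Int × String) :=
  dc_diff.map cvldEncode

-- ===== PRECONDITION & SPEC =====
def Spec_coding_varible_length_dc (dc_diff : List Int) (out : List (Int × String)) : Prop := out = coding_varible_length_dc_alt dc_diff
instance (dc_diff : List Int) (out : List (Int × String)) : Decidable (Spec_coding_varible_length_dc dc_diff out) := by unfold Spec_coding_varible_length_dc; infer_instance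

-- ===== CLAIM (what is proved, stated in full; the proofs are below) =====
def Claim_equal_coding_varible_length_dc : Prop := ∀ (dc_diff : List Int), Dom_coding_varible_length_dc dc_diff → Spec_coding_varible_length_dc dc_diff (coding_varible_length_dc dc_diff)

-- ===== LEMMAS AND PROOFS =====

-- the binary digits of n, lsb first, exactly k of them
def pvBitsW (k n : Nat) : List Char :=
  match k with
  | 0 => []
  | k + 1 => pvDigit (n % 2) :: pvBitsW k (n / 2)

theorem pvBitlen_pos (n : Nat) (h : n ≠ 0) : 1 ≤ pvBitlen n := by
  rw [pvBitlen]; simp [h]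

theorem lt_two_pow_pvBitlen (n : Nat) : n < 2 ^ pvBitlen n := by
  induction n using Nat.strong_induction_on with
  | _ n ih =>
    rw [pvBitlen]
    by_cases h : n = 0
    · simp [h]
    · have := ih (n / 2) (Nat.div_lt_self (Nat.pos_of_ne_zero h) (by omega))
      simp only [h, dif_neg, not_false_iff, pow_succ]
      omega

theorem pvPad_bits_eq_bitsW (k : Nat) : ∀ n, 1 ≤ k → n < 2 ^ k →
    pvPad k (pvBits n) = (pvBitsW k n).reverse := by
  induction k with
  | zero => intro n h; omega
  | succ k ih =>
    intro n _ hn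
    by_cases hk : k = 0
    · subst hk
      have h2 : n < 2 := by simpa using hn
      rw [pvBits]
      simp [h2, pvPad, pvBitsW, Nat.mod_eq_of_lt h2]
    · have hk1 : 1 ≤ k := Nat.pos_of_ne_zero hk
      have hdiv : n / 2 < 2 ^ k := by
        rw [pow_succ] at hn; omega
      have ihn := ih (n / 2) hk1 hdiv
      rw [pvBits]
      by_cases h2 : n < 2
      · -- n / 2 = 0
        have h0 : n / 2 = 0 := by omega
        rw [h0] at ihn
        have hb0 : pvBits 0 = ['0'] := by rw [pvBits]; simp [pvDigit]
        rw [hb0] at ihn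
        have hmod : n % 2 = n := Nat.mod_eq_of_lt h2
        simp only [h2, dif_pos, pvBitsW, List.reverse_cons, hmod]
        rw [h0, ← ihn]
        simp only [pvPad, List.length_cons, List.length_nil]
        conv_lhs => rw [show k + 1 - (0 + 1) = (k - 1) + 1 by omega, List.replicate_succ']
      · simp only [h2, dif_neg, not_false_iff, pvBitsW, List.reverse_cons, ← ihn, pvPad]
        rw [show k + 1 - (pvBits (n / 2) ++ [pvDigit (n % 2)]).length =
          k - (pvBits (n / 2)).length by simp]
        simp [List.append_assoc]

theorem pvBitsW_compl (k : Nat) : ∀ n, n < 2 ^ k →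
    pvBitsW k (2 ^ k - 1 - n) = (pvBitsW k n).map pvInvChar := by
  induction k with
  | zero => intro n h; rfl
  | succ k ih =>
    intro n hn
    have h2 : (2 : Nat) ^ (k + 1) = 2 * 2 ^ k := by rw [pow_succ]; ring
    have hq : (2 ^ (k + 1) - 1 - n) / 2 = 2 ^ k - 1 - n / 2 := by
      have hp : (0:Nat) < 2 ^ k := Nat.two_pow_pos _
      omega
    have hm : (2 ^ (k + 1) - 1 - n) % 2 = 1 - n % 2 := by
      have hp : (0:Nat) < 2 ^ k := Nat.two_pow_pos _
      omega
    have hdiv : n / 2 < 2 ^ k := by omega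
    simp only [pvBitsW, hq, hm, ih (n / 2) hdiv, List.map_cons]
    congr 1
    rcases Nat.mod_two_eq_zero_or_one n with h | h <;> simp [h, pvDigit, pvInvChar]

-- the per-element body of A's loop equals B's encoder
theorem cvld_elem_eq (i : Int) :
    (if i = 0 then ((0 : Int), "")
     else
       let abs_val := i.natAbs
       let size := pvBitlen abs_val
       if i > 0 then ((size : Int), String.ofList (pvPad size (pvBits abs_val)))
       else ((size : Int), String.ofList ((pvPad size (pvBits abs_val)).map pvInvChar)))
    = cvldEncode i := by
  rw [cvldEncode]
  by_cases h0 : i = 0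
  · simp [h0]
  · simp only [h0, if_neg, not_false_iff]
    by_cases hp : i > 0
    · simp [hp]
    · simp only [hp, if_neg, not_false_iff]
      have hneg : i < 0 := by omega
      set a := i.natAbs with ha
      have ha1 : 1 ≤ a := by omega
      set size := pvBitlen a with hs
      have hsz : 1 ≤ size := pvBitlen_pos a (by omega)
      have hlt : a < 2 ^ size := lt_two_pow_pvBitlen a
      have hval : ((2 : Int) ^ size - 1 + i).natAbs = 2 ^ size - 1 - a := by
        have h2 : ((2 : Int) ^ size) = ((2 ^ size : Nat) : Int) := by push_cast; ring
        rw [h2]; omega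
      rw [hval]
      have hcl : 2 ^ size - 1 - a < 2 ^ size := by omega
      rw [pvPad_bits_eq_bitsW size a hsz hlt, pvPad_bits_eq_bitsW size _ hsz hcl,
        pvBitsW_compl size a hlt, List.map_reverse]

theorem cvld_foldl (l : List Int) : ∀ acc : List (Int × String),
    l.foldl (fun res i =>
      if i = 0 then res ++ [((0 : Int), "")]
      else
        let abs_val := i.natAbs
        let size := pvBitlen abs_val
        if i > 0 then
          res ++ [((size : Int), String.ofList (pvPad size (pvBits abs_val)))]
        else
          res ++ [((size : Int), String.ofList ((pvPad size (pvBits abs_val)).map pvInvChar))]) acc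
    = acc ++ l.map cvldEncode := by
  induction l with
  | nil => intro acc; simp
  | cons x xs ih =>
    intro acc
    simp only [List.foldl_cons, List.map_cons]
    rw [← cvld_elem_eq x]
    by_cases h0 : x = 0
    · simp [h0, ih]
    · by_cases hp : x > 0 <;> simp [h0, hp, ih]

-- ===== VERDICT (by name: the statement is the Claim_ definition above) =====
theorem coding_varible_length_dc_spec : Claim_equal_coding_varible_length_dc := by
  intro dc_diff _
  unfold Spec_coding_varible_length_dc coding_varible_length_dc coding_varible_length_dc_alt
  simpa using cvld_foldl dc_diff []
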